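-- pv_equiv track=rewrite | github.com/Jiaqi1008/SemEval2020_Task5 | Subtask2_data_generation/getjson.py | case3_
-- ===== SOURCE A (Python) =====
-- def case3_(tagged):
--     case3 = 0
--     for tags in tagged:
--         if (tags[1] == 'MD') and (case3 == 0):
--             case3 = 1
--         elif (case3 == 1) and (tags[1] == 'VBN'):
--             case3 = 2
--         elif (case3 == 2) and (tags[1] == 'MD'):  # Was missing this part
--             return True  # MD VBN MD
-- ===== SOURCE B (Python) =====
-- def case3_(tagged):
--     has_m = False       # an 'MD' occurs in the suffix already scanned
--     has_vm = False      # a 'VBN' followed (later) by an 'MD' occurs in that suffix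
--     has_mvm = False     # an 'MD' then 'VBN' then 'MD' occurs in that suffix
--     for tags in reversed(tagged):
--         if tags[1] == 'MD':
--             has_mvm = has_mvm or has_vm
--             has_m = True
--         elif tags[1] == 'VBN':
--             has_vm = has_vm or has_m
--     if has_mvm:
--         return True
-- ===== Notes on version B (the rewrite author's own statement) =====
-- stated objective: alternative
-- what changed: Replaces A's left-to-right early-exit 3-state automaton with a right-to-left fold that accumulates three booleans (suffix contains MD / VBN-then-MD / MD-VBN-MD) and decides at the end, with a proof that the reversed traversal yields the same answer.
import Mathlib
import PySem

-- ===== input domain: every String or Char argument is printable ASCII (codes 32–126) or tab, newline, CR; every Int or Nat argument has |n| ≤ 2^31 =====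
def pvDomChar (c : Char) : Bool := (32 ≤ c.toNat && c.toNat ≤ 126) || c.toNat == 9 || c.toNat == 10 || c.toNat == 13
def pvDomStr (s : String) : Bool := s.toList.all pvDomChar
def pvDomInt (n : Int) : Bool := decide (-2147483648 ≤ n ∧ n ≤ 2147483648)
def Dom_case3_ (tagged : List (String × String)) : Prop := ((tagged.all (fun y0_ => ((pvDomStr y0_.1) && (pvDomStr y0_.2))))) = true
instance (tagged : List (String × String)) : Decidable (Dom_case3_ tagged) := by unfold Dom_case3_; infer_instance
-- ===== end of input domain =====

-- B replaces A's left-to-right early-exit state machine with a right-to-left fold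
-- accumulating three suffix booleans (alternative decomposition, same O(n) cost).

-- ===== PORT A =====
-- A's loop with its integer flag `case3`; falling off the loop returns None.
def case3Loop (case3 : Int) : List (String × String) → Option Bool
  | [] => none
  | tags :: rest =>
    if tags.2 = "MD" ∧ case3 = 0 then case3Loop 1 rest
    else if case3 = 1 ∧ tags.2 = "VBN" then case3Loop 2 rest
    else if case3 = 2 ∧ tags.2 = "MD" then some true
    else case3Loop case3 rest

def case3_ (tagged : List (String × String)) : Option Bool := case3Loop 0 tagged

-- ===== PORT B =====
-- state = (has_m, has_vm, has_mvm): the scanned suffix contains an MD / a VBN later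
-- followed by an MD / an MD-VBN-MD subsequence.  One loop body of Source B:
def case3Step (s : Bool × Bool × Bool) (tags : String × String) : Bool × Bool × Bool :=
  if tags.2 = "MD" then (true, s.2.1, s.2.2 || s.2.1)
  else if tags.2 = "VBN" then (s.1, s.2.1 || s.1, s.2.2)
  else s

-- `for tags in reversed(tagged)` = foldl over the reversed list.
def case3__alt (tagged : List (String × String)) : Option Bool :=
  let s := tagged.reverse.foldl case3Step (false, false, false)
  if s.2.2 then some true else none

-- ===== PRECONDITION & SPEC =====
def Spec_case3_ (tagged : List (String × String)) (out : Option Bool) : Prop := out = case3__alt tagged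
instance (tagged : List (String × String)) (out : Option Bool) : Decidable (Spec_case3_ tagged out) := by unfold Spec_case3_; infer_instance

-- ===== CLAIM (what is proved, stated in full; the proofs are below) =====
def Claim_equal_case3_ : Prop := ∀ (tagged : List (String × String)), Dom_case3_ tagged → Spec_case3_ tagged (case3_ tagged)

-- ===== LEMMAS AND PROOFS =====

-- structural view of B's fold: process the list from the right
def scanR : List (String × String) → Bool × Bool × Bool
  | [] => (false, false, false)
  | x :: r => case3Step (scanR r) x

theorem foldl_reverse_scanR (xs : List (String × String)) :
    xs.reverse.foldl case3Step (false, false, false) = scanR xs := by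
  rw [List.foldl_reverse]
  induction xs with
  | nil => rfl
  | cons x r ih => simp [List.foldr, scanR, ih]

-- monotonicity: has_vm implies has_m, has_mvm implies has_vm
theorem scanR_mono (xs : List (String × String)) :
    ((scanR xs).2.1 = true → (scanR xs).1 = true) ∧
    ((scanR xs).2.2 = true → (scanR xs).2.1 = true) := by
  induction xs with
  | nil => simp [scanR]
  | cons x r ih =>
    simp only [scanR, case3Step]
    obtain ⟨ih1, ih2⟩ := ih
    by_cases h1 : x.2 = "MD" <;> by_cases h2 : x.2 = "VBN" <;>
      simp [h1, h2] <;> tauto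

theorem case3Loop_two (xs : List (String × String)) :
    case3Loop 2 xs = (if (scanR xs).1 then some true else none) := by
  induction xs with
  | nil => rfl
  | cons x r ih =>
    simp only [case3Loop, scanR, case3Step]
    by_cases h1 : x.2 = "MD"
    · simp [h1]
    · by_cases h2 : x.2 = "VBN" <;> simp [h1, h2, ih]

theorem case3Loop_one (xs : List (String × String)) :
    case3Loop 1 xs = (if (scanR xs).2.1 then some true else none) := by
  induction xs with
  | nil => rfl
  | cons x r ih =>
    simp only [case3Loop, scanR, case3Step]
    by_cases h2 : x.2 = "VBN"
    · simp only [h2, if_true]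
      rw [case3Loop_two]
      have hm := (scanR_mono r).1
      cases hvm : (scanR r).2.1
      · simp
      · simp [hm hvm]
    · by_cases h1 : x.2 = "MD" <;> simp [h1, h2, ih]

theorem case3Loop_zero (xs : List (String × String)) :
    case3Loop 0 xs = (if (scanR xs).2.2 then some true else none) := by
  induction xs with
  | nil => rfl
  | cons x r ih =>
    simp only [case3Loop, scanR, case3Step]
    by_cases h1 : x.2 = "MD"
    · simp only [h1, if_true]
      rw [case3Loop_one]
      have hvm := (scanR_mono r).2
      cases hmvm : (scanR r).2.2
      · simp
      · simp [hvm hmvm]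
    · by_cases h2 : x.2 = "VBN" <;> simp [h1, h2, ih]

-- ===== VERDICT (by name: the statement is the Claim_ definition above) =====
theorem case3__spec : Claim_equal_case3_ := by
  intro tagged _
  unfold Spec_case3_ case3_ case3__alt
  rw [foldl_reverse_scanR, case3Loop_zero]
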